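-- pv_equiv track=rewrite | github.com/LS4GAN/toytools | toytools/collect.py | filter_parsed_images
-- ===== SOURCE A (Python) =====
-- from typing import Dict, List, Tuple, Optional, Set, Union
--
-- def filter_parsed_images(
--     parsed_images : List[Tuple[str, str, int, str]],
--     apas          : Optional[Set[int]] = None,
--     planes        : Optional[Set[str]] = None,
-- ) -> List[Tuple[str, str, int, str]]:
--     """Filter parsed images list based on APAs and Wire Planes"""
--
--     if apas is not None:
--         parsed_images = [ x for x in parsed_images if x[2] in apas ]
--
--     if planes is not None:
--         parsed_images = [ x for x in parsed_images if x[3] in planes ]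
--
--     return parsed_images
-- ===== SOURCE B (Python) =====
-- from typing import List, Tuple, Optional, Set
--
-- def filter_parsed_images(
--     parsed_images : List[Tuple[str, str, int, str]],
--     apas          : Optional[Set[int]] = None,
--     planes        : Optional[Set[str]] = None,
-- ) -> List[Tuple[str, str, int, str]]:
--     """Filter parsed images by APAs and Wire Planes via index-set algebra:
--     compute the set of surviving indices by intersection, then rebuild the
--     list from the sorted index set."""
--     keep = set(range(len(parsed_images)))
--     if apas is not None:
--         keep &= {i for i, x in enumerate(parsed_images) if x[2] in apas}
--     if planes is not None:
--         keep &= {i for i, x in enumerate(parsed_images) if x[3] in planes}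
--     return [parsed_images[i] for i in sorted(keep)]
-- ===== Notes on version B (the rewrite author's own statement) =====
-- stated objective: alternative
-- what changed: B works on index sets instead of element lists: it builds the set of all positions, intersects it with the index set passing each given membership test, and reconstructs the output by indexing along the sorted surviving index set, whereas A sequentially rebinds the element list through gated filtering comprehensions.
import Mathlib
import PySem

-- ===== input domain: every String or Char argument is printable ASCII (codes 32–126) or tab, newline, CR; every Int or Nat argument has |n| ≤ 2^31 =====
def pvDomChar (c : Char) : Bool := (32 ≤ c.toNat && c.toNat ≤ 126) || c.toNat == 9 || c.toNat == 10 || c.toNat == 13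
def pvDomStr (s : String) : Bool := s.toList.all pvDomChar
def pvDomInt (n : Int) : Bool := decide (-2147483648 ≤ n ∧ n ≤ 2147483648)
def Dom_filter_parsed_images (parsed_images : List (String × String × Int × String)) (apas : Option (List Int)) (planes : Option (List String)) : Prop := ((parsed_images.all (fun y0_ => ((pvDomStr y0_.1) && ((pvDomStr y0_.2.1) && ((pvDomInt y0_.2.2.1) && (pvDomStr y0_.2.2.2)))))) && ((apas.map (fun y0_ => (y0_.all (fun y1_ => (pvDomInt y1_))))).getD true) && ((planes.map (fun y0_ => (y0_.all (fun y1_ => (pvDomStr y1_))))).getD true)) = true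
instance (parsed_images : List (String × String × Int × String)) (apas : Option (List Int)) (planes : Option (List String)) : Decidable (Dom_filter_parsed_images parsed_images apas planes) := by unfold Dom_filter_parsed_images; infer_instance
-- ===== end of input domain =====

-- B computes the surviving positions as an index set (intersection of the per-test index sets)
-- and rebuilds the output by indexing along the sorted index set (objective: alternative).

-- ===== PORT A =====
-- A: two sequential gated list comprehensions, each rebinding parsed_images
def filter_parsed_images (parsed_images : List (String × String × Int × String)) (apas : Option (List Int)) (planes : Option (List String)) : List (String × String × Int × String) :=
  let pis1 :=
    match apas with
    | none => parsed_images
    | some a => parsed_images.filter (fun x => a.contains x.2.2.1)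
  match planes with
  | none => pis1
  | some p => pis1.filter (fun x => p.contains x.2.2.2)

-- ===== PORT B =====
-- B: index-set algebra — keep = set(range(n)), intersected with each test's index set, then
--    output is parsed_images indexed along sorted(keep). pyGetD's default is never reached
--    (all kept indices are in range), matching Python's parsed_images[i].
def filter_parsed_images_alt (parsed_images : List (String × String × Int × String)) (apas : Option (List Int)) (planes : Option (List String)) : List (String × String × Int × String) :=
  let keep0 : PySem.Set Int := PySem.Set.ofList (PySem.List.pyRange 0 (PySem.List.len parsed_images))
  let keep1 : PySem.Set Int :=
    match apas with
    | none => keep0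
    | some a => PySem.Set.inter keep0 (PySem.Set.ofList (((PySem.List.enumerate parsed_images).filter (fun ix => a.contains ix.2.2.2.1)).map (·.1)))
  let keep2 : PySem.Set Int :=
    match planes with
    | none => keep1
    | some p => PySem.Set.inter keep1 (PySem.Set.ofList (((PySem.List.enumerate parsed_images).filter (fun ix => p.contains ix.2.2.2.2)).map (·.1)))
  (PySem.List.sorted keep2 (fun i => i)).map (fun i => PySem.List.pyGetD parsed_images i ("", "", 0, ""))

-- ===== PRECONDITION & SPEC =====
def Spec_filter_parsed_images (parsed_images : List (String × String × Int × String)) (apas : Option (List Int)) (planes : Option (List String)) (out : List (String × String × Int × String)) : Prop := out = filter_parsed_images_alt parsed_images apas planes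
instance (parsed_images : List (String × String × Int × String)) (apas : Option (List Int)) (planes : Option (List String)) (out : List (String × String × Int × String)) : Decidable (Spec_filter_parsed_images parsed_images apas planes out) := by unfold Spec_filter_parsed_images; infer_instance

-- ===== CLAIM =====
def Claim_equal_filter_parsed_images : Prop := ∀ (parsed_images : List (String × String × Int × String)) (apas : Option (List Int)) (planes : Option (List String)), Dom_filter_parsed_images parsed_images apas planes → Spec_filter_parsed_images parsed_images apas planes (filter_parsed_images parsed_images apas planes)

-- ===== LEMMAS AND PROOFS =====

-- The index set of elements passing a test, as B builds it, is range-filtered by the test on pyGetD.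
theorem pv_idxset (xs : List (String × String × Int × String)) (q : (String × String × Int × String) → Bool) (d : String × String × Int × String) :
    ((PySem.List.enumerate xs).filter (fun ix => q ix.2)).map (·.1)
      = (PySem.List.pyRange 0 (PySem.List.len xs)).filter (fun j => q (PySem.List.pyGetD xs j d)) := by
  rw [PySem.List.enumerate_eq_map_pyRange xs d, List.filter_map, List.map_map]
  simp [Function.comp_def]

-- Intersecting an index list (here: a duplicate-free range, pinned by _hnd) with the index set of a test filters it by the test.
theorem pv_inter_filter (r : List Int) (_hnd : r.Nodup) (q : Int → Bool) (sub : List Int)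
    (hmem : ∀ j ∈ r, (j ∈ sub ↔ q j = true)) :
    PySem.Set.inter r (PySem.Set.ofList sub) = r.filter q := by
  unfold PySem.Set.inter
  apply List.filter_congr
  intro j hj
  simp [PySem.Set.contains_eq_listContains, PySem.Set.mem_ofList, hmem j hj]

-- Rebuilding xs from a test-filtered index range equals filtering xs by the test.
theorem pv_map_filter_range (xs : List (String × String × Int × String)) (q : (String × String × Int × String) → Bool) (d : String × String × Int × String) :
    ((PySem.List.pyRange 0 (PySem.List.len xs)).filter (fun j => q (PySem.List.pyGetD xs j d))).map (fun j => PySem.List.pyGetD xs j d) = xs.filter q := by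
  rw [show (fun j => q (PySem.List.pyGetD xs j d)) = (q ∘ fun j => PySem.List.pyGetD xs j d) from rfl,
    ← List.filter_map, PySem.List.map_pyGetD_pyRange_zero]

-- ===== VERDICT =====
theorem filter_parsed_images_spec : Claim_equal_filter_parsed_images := by
  intro pis apas planes _
  unfold Spec_filter_parsed_images filter_parsed_images filter_parsed_images_alt
  set d : String × String × Int × String := ("", "", 0, "") with hd
  have hnd := PySem.List.nodup_pyRange_one 0 (PySem.List.len pis)
  have hpw := PySem.List.pairwise_lt_pyRange_one 0 (PySem.List.len pis)
  rw [PySem.Set.ofList_eq_self_of_nodup _ hnd]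
  cases apas with
  | none =>
    cases planes with
    | none =>
      dsimp only
      rw [PySem.List.sorted_eq_of_perm_of_pairwise_lt _ _ _ (List.Perm.refl _) hpw,
        PySem.List.map_pyGetD_pyRange_zero]
    | some p =>
      dsimp only
      rw [pv_idxset pis (fun x => p.contains x.2.2.2) d,
        pv_inter_filter _ hnd (fun j => p.contains (PySem.List.pyGetD pis j d).2.2.2) _
          (fun j hj => by simp only [pysem, List.mem_filter] at hj ⊢; simp [hj]),
        PySem.List.sorted_eq_of_perm_of_pairwise_lt _ _ _ (List.Perm.refl _) (hpw.filter _),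
        pv_map_filter_range pis (fun x => p.contains x.2.2.2) d]
  | some a =>
    cases planes with
    | none =>
      dsimp only
      rw [pv_idxset pis (fun x => a.contains x.2.2.1) d,
        pv_inter_filter _ hnd (fun j => a.contains (PySem.List.pyGetD pis j d).2.2.1) _
          (fun j hj => by simp only [pysem, List.mem_filter] at hj ⊢; simp [hj]),
        PySem.List.sorted_eq_of_perm_of_pairwise_lt _ _ _ (List.Perm.refl _) (hpw.filter _),
        pv_map_filter_range pis (fun x => a.contains x.2.2.1) d]
    | some p =>
      dsimp only
      rw [pv_idxset pis (fun x => a.contains x.2.2.1) d,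
        pv_inter_filter _ hnd (fun j => a.contains (PySem.List.pyGetD pis j d).2.2.1) _
          (fun j hj => by simp only [pysem, List.mem_filter] at hj ⊢; simp [hj]),
        pv_idxset pis (fun x => p.contains x.2.2.2) d,
        pv_inter_filter _ (hnd.filter _) (fun j => p.contains (PySem.List.pyGetD pis j d).2.2.2) _
          (fun j hj => by simp only [pysem, List.mem_filter] at hj ⊢; simp [hj]),
        List.filter_filter,
        PySem.List.sorted_eq_of_perm_of_pairwise_lt _ _ _ (List.Perm.refl _) ((hpw.filter _).filter _),
        List.filter_filter,
        pv_map_filter_range pis (fun x => p.contains x.2.2.2 && a.contains x.2.2.1) d]
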